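-- pv_equiv track=rewrite | github.com/Krishna-Arun/AI_Genie_v2 | ai_genie_ui/boinc_db_adapter.py | _chunk_status
-- ===== SOURCE A (Python) =====
-- from typing import Any, Dict, Iterable, List, Optional, Sequence, Tuple
--
-- RESULT_SERVER_STATE_IN_PROGRESS = 4
--
-- RESULT_SERVER_STATE_OVER = 5
--
-- RESULT_OUTCOME_SUCCESS = 1
--
-- VALIDATE_STATE_VALID = 1
--
-- VALIDATE_STATE_NO_CHECK = 3
--
-- def _chunk_status(wu_need_validate: int, results: List[Dict[str, Any]]) -> str:
--     # queued / running / completed / failed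
--     if not results:
--         return "queued"
--     if any(r["server_state"] == RESULT_SERVER_STATE_IN_PROGRESS for r in results):
--         return "running"
--     # success = outcome=SUCCESS and server_state=OVER
--     success_results = [
--         r for r in results
--         if r["server_state"] == RESULT_SERVER_STATE_OVER and r["outcome"] == RESULT_OUTCOME_SUCCESS
--     ]
--     if success_results:
--         if not wu_need_validate:
--             return "completed"
--         # If validator is used, wait for validate_state VALID / NO_CHECK
--         if any(r["validate_state"] in (VALIDATE_STATE_VALID, VALIDATE_STATE_NO_CHECK) for r in success_results):
--             return "completed"
--         # success returned, but validator not yet decided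
--         return "running"
--     # no successes and all are OVER => failed
--     if all(r["server_state"] == RESULT_SERVER_STATE_OVER for r in results):
--         return "failed"
--     return "queued"
-- ===== SOURCE B (Python) =====
-- RESULT_SERVER_STATE_IN_PROGRESS = 4
-- RESULT_SERVER_STATE_OVER = 5
-- RESULT_OUTCOME_SUCCESS = 1
-- VALIDATE_STATE_VALID = 1
-- VALIDATE_STATE_NO_CHECK = 3
--
-- def _chunk_status(wu_need_validate, results):
--     # Single pass over results, accumulating flags instead of A's four passes.
--     if not results:
--         return "queued"
--     has_success = False
--     success_validated = False
--     all_over = True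
--     for r in results:
--         ss = r["server_state"]
--         if ss == RESULT_SERVER_STATE_IN_PROGRESS:
--             return "running"
--         if ss != RESULT_SERVER_STATE_OVER:
--             all_over = False
--         elif r["outcome"] == RESULT_OUTCOME_SUCCESS:
--             has_success = True
--             if wu_need_validate and not success_validated:
--                 vs = r["validate_state"]
--                 if vs == VALIDATE_STATE_VALID or vs == VALIDATE_STATE_NO_CHECK:
--                     success_validated = True
--     if has_success:
--         if not wu_need_validate or success_validated:
--             return "completed"
--         return "running"
--     if all_over:
--         return "failed"
--     return "queued"
-- ===== Notes on version B (the rewrite author's own statement) =====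
-- stated objective: alternative
-- what changed: Replaces A's four separate passes (any, list-comprehension filter, any over the filtered list, all) by one loop that accumulates has_success / success_validated / all_over flags and short-circuits on an in-progress result.
-- outside the precondition, e.g. on _chunk_status(0, [{'server_state': 5}, {'server_state': 4}]): A returns 'running', B raises KeyError
import Mathlib
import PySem

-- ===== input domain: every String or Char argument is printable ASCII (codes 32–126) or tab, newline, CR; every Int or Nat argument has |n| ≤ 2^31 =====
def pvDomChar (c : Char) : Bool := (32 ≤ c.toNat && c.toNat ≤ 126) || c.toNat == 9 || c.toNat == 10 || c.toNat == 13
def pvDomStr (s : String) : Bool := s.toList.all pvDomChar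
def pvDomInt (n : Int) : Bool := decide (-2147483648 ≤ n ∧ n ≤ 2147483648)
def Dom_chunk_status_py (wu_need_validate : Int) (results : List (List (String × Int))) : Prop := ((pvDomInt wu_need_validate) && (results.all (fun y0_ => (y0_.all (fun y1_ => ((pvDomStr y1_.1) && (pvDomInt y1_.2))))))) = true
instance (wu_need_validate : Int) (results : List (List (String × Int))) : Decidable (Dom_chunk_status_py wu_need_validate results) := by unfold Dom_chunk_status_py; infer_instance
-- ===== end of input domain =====

-- B replaces A's four passes over the result list by one flag-accumulating loop (alternative decomposition, same cost).

-- ===== PORT A =====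
-- r[k] for the assoc-list dicts; exact while the key is present (Pre_ below); Python raises KeyError otherwise.
def pvGet (r : List (String × Int)) (k : String) : Int := (r.lookup k).getD 0

def chunk_status_py (wu_need_validate : Int) (results : List (List (String × Int))) : String :=
  if results = [] then "queued"
  else if results.any (fun r => pvGet r "server_state" == 4) then "running"
  else
    let success_results := results.filter
      (fun r => pvGet r "server_state" == 5 && pvGet r "outcome" == 1)
    if success_results ≠ [] then
      if wu_need_validate == 0 then "completed"
      else if success_results.any
          (fun r => pvGet r "validate_state" == 1 || pvGet r "validate_state" == 3) then "completed"
      else "running"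
    else if results.all (fun r => pvGet r "server_state" == 5) then "failed"
    else "queued"

-- ===== PORT B =====
def altLoop (wu : Int) : List (List (String × Int)) → Bool → Bool → Bool → String
  | [], has_success, success_validated, all_over =>
      if has_success then
        if wu == 0 || success_validated then "completed" else "running"
      else if all_over then "failed" else "queued"
  | r :: rest, has_success, success_validated, all_over =>
      let ss := pvGet r "server_state"
      if ss == 4 then "running"
      else if ss != 5 then altLoop wu rest has_success success_validated false
      else if pvGet r "outcome" == 1 then
        altLoop wu rest true
          (if wu != 0 && !success_validated then
            (if pvGet r "validate_state" == 1 || pvGet r "validate_state" == 3 then true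
             else success_validated)
           else success_validated)
          all_over
      else altLoop wu rest has_success success_validated all_over

def chunk_status_py_alt (wu_need_validate : Int) (results : List (List (String × Int))) : String :=
  if results = [] then "queued"
  else altLoop wu_need_validate results false false true

-- ===== PRECONDITION & SPEC =====
-- Pre_ excludes inputs where some result lacks a key the function may inspect (server_state; outcome when
-- the result is over; validate_state on a success when validation is on): there A either raises KeyError or
-- returns only because short-circuiting / pass ordering happened not to reach the missing key, an artefact.
def Pre_chunk_status_py (wu_need_validate : Int) (results : List (List (String × Int))) : Prop :=
  ∀ r ∈ results, (r.lookup "server_state").isSome = true ∧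
    (r.lookup "server_state" = some 5 →
      (r.lookup "outcome").isSome = true ∧
      (r.lookup "outcome" = some 1 → wu_need_validate ≠ 0 →
        (r.lookup "validate_state").isSome = true))
instance (wu_need_validate : Int) (results : List (List (String × Int))) : Decidable (Pre_chunk_status_py wu_need_validate results) := by unfold Pre_chunk_status_py; infer_instance

def pvWitness_chunk_status_py : Int × (List (List (String × Int))) :=
  (1, [[("server_state", 5), ("outcome", 1), ("validate_state", 1)]])

def Spec_chunk_status_py (wu_need_validate : Int) (results : List (List (String × Int))) (out : String) : Prop := out = chunk_status_py_alt wu_need_validate results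
instance (wu_need_validate : Int) (results : List (List (String × Int))) (out : String) : Decidable (Spec_chunk_status_py wu_need_validate results out) := by unfold Spec_chunk_status_py; infer_instance

-- ===== CLAIM (what is proved, stated in full; the proofs are below) =====
def Claim_equal_chunk_status_py : Prop := ∀ (wu_need_validate : Int) (results : List (List (String × Int))), Dom_chunk_status_py wu_need_validate results → Pre_chunk_status_py wu_need_validate results → Spec_chunk_status_py wu_need_validate results (chunk_status_py wu_need_validate results)

-- ===== LEMMAS AND PROOFS =====
lemma altLoop_eq (wu : Int) (l : List (List (String × Int))) :
    ∀ (hs sv ao : Bool),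
    altLoop wu l hs sv ao =
      if l.any (fun r => pvGet r "server_state" == 4) then "running"
      else if hs || l.any (fun r => pvGet r "server_state" == 5 && pvGet r "outcome" == 1) then
        if wu == 0 || (sv || l.any (fun r =>
            (pvGet r "server_state" == 5 && pvGet r "outcome" == 1) &&
            (pvGet r "validate_state" == 1 || pvGet r "validate_state" == 3))) then "completed"
        else "running"
      else if ao && l.all (fun r => pvGet r "server_state" == 5) then "failed"
      else "queued" := by
  induction l with
  | nil => intro hs sv ao; simp [altLoop]
  | cons r rest ih =>
    intro hs sv ao
    simp only [altLoop, List.any_cons, List.all_cons]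
    by_cases h4 : (pvGet r "server_state" == 4) = true
    · simp only [h4, Bool.true_or, if_pos]
    · rw [if_neg (by simp [h4])]
      by_cases h5 : (pvGet r "server_state" == 5) = true
      · rw [if_neg (by simp [bne, h5])]
        by_cases ho : (pvGet r "outcome" == 1) = true
        · rw [if_pos ho, ih]
          by_cases hw : (wu == 0) = true <;>
          by_cases hv : (pvGet r "validate_state" == 1 || pvGet r "validate_state" == 3) = true <;>
          by_cases hC : (rest.any fun x => pvGet x "server_state" == 5 && pvGet x "outcome" == 1 &&
              (pvGet x "validate_state" == 1 || pvGet x "validate_state" == 3)) = true <;>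
          cases sv <;>
          simp [hw, hv, hC, h4, h5, ho, bne]
        · rw [if_neg ho, ih]
          simp only [h4, h5, ho, Bool.and_false, Bool.true_and, Bool.false_or, Bool.false_and]
      · have hne : (pvGet r "server_state" != 5) = true := by simp [bne, h5]
        rw [if_pos hne, ih]
        simp only [h4, Bool.eq_false_iff.mpr h5, Bool.false_and, Bool.false_or, Bool.and_false]

lemma filter_ne_nil_iff_any {α : Type} (p : α → Bool) (l : List α) :
    (l.filter p ≠ []) ↔ l.any p = true := by
  rw [ne_eq, List.filter_eq_nil_iff, List.any_eq_true]
  push Not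
  exact ⟨fun ⟨x, hx, hp⟩ => ⟨x, hx, by simpa using hp⟩,
         fun ⟨x, hx, hp⟩ => ⟨x, hx, by simpa using hp⟩⟩

-- ===== VERDICT (by name: the statement is the Claim_ definition above) =====
theorem chunk_status_py_spec : Claim_equal_chunk_status_py := by
  intro wu results _ _
  unfold Spec_chunk_status_py chunk_status_py chunk_status_py_alt
  by_cases hnil : results = []
  · simp only [hnil, if_pos]
  · rw [if_neg hnil, if_neg hnil, altLoop_eq]
    by_cases h4 : results.any (fun r => pvGet r "server_state" == 4) = true
    · rw [if_pos h4, if_pos h4]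
    · rw [if_neg h4, if_neg h4]
      simp only [Bool.false_or, Bool.true_and]
      by_cases hs : results.any (fun r => pvGet r "server_state" == 5 && pvGet r "outcome" == 1) = true
      · rw [if_pos ((filter_ne_nil_iff_any _ _).mpr hs), if_pos hs]
        by_cases hw : (wu == 0) = true
        · rw [if_pos hw, if_pos (by rw [hw]; rfl)]
        · rw [if_neg hw]
          rw [List.any_filter]
          simp only [Bool.eq_false_iff.mpr hw, Bool.false_or]
      · rw [if_neg (fun h => hs ((filter_ne_nil_iff_any _ _).mp h)), if_neg hs]
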